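-- pv_equiv track=rewrite | github.com/dnkim/MiniCInterpreter | Command.py | check_name_print
-- ===== SOURCE A (Python) =====
-- def check_name_print(name):
-- 	enc_legalc = False
-- 	enc_lbrack = False
-- 	enc_number = False
-- 	enc_rbrack = False
--
-- 	index_start = 0
-- 	for i in range(len(name)):
-- 		c = name[i]
-- 		if not enc_legalc:
-- 			if c.isalpha() or c == "_":
-- 				enc_legalc = True
-- 				continue
--
-- 		elif not enc_lbrack:
-- 			if c.isalpha() or c.isdecimal() or c == "_":
-- 				continue
-- 			if c == '[':
-- 				enc_lbrack = True
-- 				continue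
--
-- 		elif not enc_number:
-- 			if c.isdecimal():
-- 				index_start = i
-- 				enc_number = True
-- 				continue
--
-- 		elif not enc_rbrack:
-- 			if c.isdecimal():
-- 				continue
-- 			if c == ']':
-- 				enc_rbrack = True
-- 				continue
--
-- 		return False, None, None
--
-- 	symbol = name[0 : index_start - 1] if enc_rbrack else name
-- 	index = int(name[index_start : -1]) if enc_rbrack else None
-- 	return True, symbol, index
-- ===== SOURCE B (Python) =====
-- def _is_ident(s):
--     return bool(s) and (s[0].isalpha() or s[0] == '_') and all(
--         c.isalpha() or c.isdecimal() or c == '_' for c in s[1:])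
--
--
-- def check_name_print(name):
--     base, sep, idx = name.partition('[')
--     if not _is_ident(base):
--         return False, None, None
--     if not sep:
--         return True, name, None
--     if idx.endswith(']') and idx[:-1].isdecimal():
--         return True, base, int(idx[:-1])
--     return False, None, None
-- ===== Notes on version B (the rewrite author's own statement) =====
-- stated objective: simpler
-- what changed: Replaces the four-flag character state machine with a direct decomposition via str.partition('['): validate the identifier part and the optional bracketed decimal index with slicing and endswith.
-- intended difference: On the empty string and on names of the form identifier '[' digits with no closing ']' (e.g. '', 'a[', 'a[12'), A falls through and returns (True, name, None); B returns (False, None, None), rejecting these malformed names, which is the intended validation. — e.g. on check_name_print("a["): A returns (true, some "a[", none), B returns (false, none, none)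
import Mathlib
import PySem

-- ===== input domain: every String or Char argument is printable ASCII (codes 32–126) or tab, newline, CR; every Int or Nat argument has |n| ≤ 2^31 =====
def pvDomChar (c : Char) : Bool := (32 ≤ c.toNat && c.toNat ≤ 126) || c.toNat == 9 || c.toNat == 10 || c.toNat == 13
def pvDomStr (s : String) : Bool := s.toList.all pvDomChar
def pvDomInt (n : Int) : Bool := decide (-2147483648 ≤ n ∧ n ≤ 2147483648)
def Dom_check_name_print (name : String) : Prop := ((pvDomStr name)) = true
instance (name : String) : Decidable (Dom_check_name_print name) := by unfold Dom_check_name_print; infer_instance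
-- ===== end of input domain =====

-- B replaces A's four-flag character state machine by a direct decomposition at the first '['
-- (partition, then identifier / bracketed-index validation with slices); on empty or
-- unterminated-bracket names A accepts and B rejects, stated below as the intended difference D_.

-- shared character predicates (c.isalpha() or c == "_"  /  c.isalpha() or c.isdecimal() or c == "_")
def pvHeadOk (c : Char) : Bool := PySem.Chars.isalpha c || c == '_'
def pvTailOk (c : Char) : Bool := PySem.Chars.isalpha c || PySem.Chars.isdigit c || c == '_'

-- ===== PORT A =====
-- A's for-loop over range(len(name)) with early return: structural recursion over the remaining
-- characters, carrying the index i, the four booleans and index_start; none = `return False, None, None`.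
def pvLoopA : List Char → Nat → Bool → Bool → Bool → Bool → Nat → Option (Bool × Nat)
  | [], _, _, _, _, rb, ist => some (rb, ist)
  | c :: cs, i, legalc, lbrack, number, rb, ist =>
    if !legalc then
      if pvHeadOk c then pvLoopA cs (i+1) true lbrack number rb ist else none
    else if !lbrack then
      if pvTailOk c then pvLoopA cs (i+1) legalc lbrack number rb ist
      else if c == '[' then pvLoopA cs (i+1) legalc true number rb ist
      else none
    else if !number then
      if PySem.Chars.isdigit c then pvLoopA cs (i+1) legalc lbrack true rb i else none
    else if !rb then
      if PySem.Chars.isdigit c then pvLoopA cs (i+1) legalc lbrack number rb ist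
      else if c == ']' then pvLoopA cs (i+1) legalc lbrack number true ist
      else none
    else none

def check_name_print (name : String) : Bool × Option String × Option Int :=
  let cs := name.toList
  match pvLoopA cs 0 false false false false 0 with
  | none => (false, none, none)
  | some (rb, ist) =>
    if rb then
      (true, some (String.mk (PySem.List.slice cs (some 0) (some ((ist : Int) - 1)))),
       some ((PySem.Int.ofChars? (PySem.List.slice cs (some (ist : Int)) (some (-1)))).getD 0))
    else (true, some name, none)

-- ===== PORT B =====
-- _is_ident: nonempty, first char alpha/underscore, remaining chars alphanumeric/underscore
def pvIsIdent : List Char → Bool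
  | [] => false
  | c :: cs => pvHeadOk c && cs.all pvTailOk

def check_name_print_alt (name : String) : Bool × Option String × Option Int :=
  let cs := name.toList
  -- name.partition('['): hand port, exact for the one-character separator '['
  let base := cs.takeWhile (· ≠ '[')
  let sepIdx := cs.dropWhile (· ≠ '[')   -- sep ++ idx; empty iff '[' absent
  if !pvIsIdent base then (false, none, none)
  else
    match sepIdx with
    | [] => (true, some name, none)
    | _ :: idx =>
      if PySem.Chars.endswith idx [']'] && PySem.Chars.strIsdigit idx.dropLast then
        (true, some (String.mk base), some ((PySem.Int.ofChars? idx.dropLast).getD 0))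
      else (false, none, none)

-- ===== PRECONDITION & SPEC =====
-- On the empty string and on names of the form <identifier>'['<digits> with no closing ']'
-- (e.g. "", "a[", "a[12"), A falls through and returns (true, name, none); B returns
-- (false, none, none), rejecting these malformed names, which is the intended validation.
def pvDIdent (l : List Char) : Bool :=
  !l.isEmpty && (PySem.Chars.isalpha l.head! || l.head! == '_')
    && l.tail.all (fun d => PySem.Chars.isalpha d || PySem.Chars.isdigit d || d == '_')

def D_check_name_print (name : String) : Prop :=
  name = "" ∨
    ((name.toList.dropWhile (· ≠ '[')) ≠ [] ∧
     pvDIdent (name.toList.takeWhile (· ≠ '[')) = true ∧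
     (name.toList.dropWhile (· ≠ '[')).tail.all PySem.Chars.isdigit = true)
instance (name : String) : Decidable (D_check_name_print name) := by unfold D_check_name_print; infer_instance

def Spec_check_name_print (name : String) (out : Bool × Option String × Option Int) : Prop := ¬ D_check_name_print name → out = check_name_print_alt name
instance (name : String) (out : Bool × Option String × Option Int) : Decidable (Spec_check_name_print name out) := by unfold Spec_check_name_print; infer_instance

def pvDiffWitness_check_name_print : String := "a["
def pvDiffWitnessOut_check_name_print : (Bool × Option String × Option Int) × (Bool × Option String × Option Int) :=
  ((true, some "a[", none), (false, none, none))

-- ===== CLAIM (what is proved, stated in full; the proofs are below) =====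
def Claim_unchanged_check_name_print : Prop := ∀ (name : String), Dom_check_name_print name → Spec_check_name_print name (check_name_print name)
def Claim_changed_check_name_print : Prop := Dom_check_name_print (pvDiffWitness_check_name_print) ∧ D_check_name_print (pvDiffWitness_check_name_print) ∧ check_name_print (pvDiffWitness_check_name_print) = pvDiffWitnessOut_check_name_print.1 ∧ check_name_print_alt (pvDiffWitness_check_name_print) = pvDiffWitnessOut_check_name_print.2 ∧ pvDiffWitnessOut_check_name_print.1 ≠ pvDiffWitnessOut_check_name_print.2
def Claim_exact_check_name_print : Prop := ∀ (name : String), Dom_check_name_print name → D_check_name_print name → check_name_print name ≠ check_name_print_alt name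

-- ===== LEMMAS AND PROOFS =====

theorem pvHeadTail {c : Char} (h : pvHeadOk c = true) : pvTailOk c = true := by
  simp [pvHeadOk] at h
  simp [pvTailOk]
  tauto

theorem pvTailNeBr {c : Char} (h : pvTailOk c = true) : c ≠ '[' := by
  rintro rfl
  simp [pvTailOk] at h
  revert h
  decide

theorem pvHeadNeBr {c : Char} (h : pvHeadOk c = true) : c ≠ '[' :=
  pvTailNeBr (pvHeadTail h)

-- pvDIdent (used by D_) agrees with B's _is_ident
theorem pvDIdent_eq (l : List Char) : pvDIdent l = pvIsIdent l := by
  cases l with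
  | nil => rfl
  | cons c cs => rfl

-- Python slice s[a:-1] for a natural a
theorem pvSliceNegOne (cs : List Char) (a : Nat) :
    PySem.List.slice cs (some (a:Int)) (some (-1)) = (cs.drop a).dropLast := by
  simp [PySem.List.slice, PySem.List.clampIdx]
  have ha : ¬((a : Int) < 0) := by omega
  simp only [if_neg ha]
  have h1 : List.drop (min a cs.length) cs = List.drop a cs := by
    rcases le_total a cs.length with h | h
    · rw [min_eq_left h]
    · rw [min_eq_right h, List.drop_length, List.drop_eq_nil_of_le h]
  rw [h1, List.dropLast_eq_take]
  congr 1
  rcases cs with _ | ⟨x, xs⟩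
  · simp
  · rw [if_neg (by simp)]
    simp [List.length_drop]
    omega

-- A's loop once all four flags are set: any further character fails
theorem pvLoopA_rb (cs : List Char) (i ist : Nat) :
    pvLoopA cs i true true true true ist = if cs = [] then some (true, ist) else none := by
  cases cs <;> simp [pvLoopA]

-- A's loop in the digits-of-the-index state
theorem pvLoopA_num (cs : List Char) (i ist : Nat) :
    pvLoopA cs i true true true false ist =
      if cs.all PySem.Chars.isdigit then some (false, ist)
      else if cs.dropWhile PySem.Chars.isdigit = [']'] then some (true, ist)
      else none := by
  induction cs generalizing i with
  | nil => simp [pvLoopA]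
  | cons c cs ih =>
    by_cases hd : PySem.Chars.isdigit c = true
    · have hstep : pvLoopA (c :: cs) i true true true false ist
          = pvLoopA cs (i+1) true true true false ist := by simp [pvLoopA, hd]
      rw [hstep, ih (i+1), List.all_cons, List.dropWhile_cons_of_pos hd, hd]
      simp
    · have hd' : PySem.Chars.isdigit c = false := Bool.eq_false_iff.mpr hd
      by_cases hc : c = ']'
      · subst hc
        have hstep : pvLoopA (']' :: cs) i true true true false ist
            = pvLoopA cs (i+1) true true true true ist := by simp [pvLoopA, hd']
        rw [hstep, pvLoopA_rb, List.all_cons, hd',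
          List.dropWhile_cons_of_neg (by simp [hd'])]
        simp
      · have hstep : pvLoopA (c :: cs) i true true true false ist = none := by
          simp [pvLoopA, hd', hc]
        rw [hstep, List.all_cons, hd', List.dropWhile_cons_of_neg (by simp [hd'])]
        simp [hc]

-- A's loop right after '[' (non-empty remainder)
theorem pvLoopA_lb (c : Char) (cs : List Char) (i ist : Nat) :
    pvLoopA (c :: cs) i true true false false ist =
      if PySem.Chars.isdigit c then
        if cs.all PySem.Chars.isdigit then some (false, i)
        else if cs.dropWhile PySem.Chars.isdigit = [']'] then some (true, i)
        else none
      else none := by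
  by_cases hd : PySem.Chars.isdigit c = true
  · have hstep : pvLoopA (c :: cs) i true true false false ist
        = pvLoopA cs (i+1) true true true false i := by simp [pvLoopA, hd]
    rw [hstep, pvLoopA_num, hd]
    simp
  · have hd' : PySem.Chars.isdigit c = false := Bool.eq_false_iff.mpr hd
    have hstep : pvLoopA (c :: cs) i true true false false ist = none := by
      simp [pvLoopA, hd']
    rw [hstep, hd']
    simp

-- A's loop scanning the identifier tail: ends cleanly if every char is a tail char
theorem pvLoopA_scan_nil (u : List Char) (i ist : Nat) (h : u.dropWhile pvTailOk = []) :
    pvLoopA u i true false false false ist = some (false, ist) := by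
  induction u generalizing i with
  | nil => rfl
  | cons c cs ih =>
    by_cases ht : pvTailOk c = true
    · rw [List.dropWhile_cons_of_pos ht] at h
      have hstep : pvLoopA (c :: cs) i true false false false ist
          = pvLoopA cs (i+1) true false false false ist := by simp [pvLoopA, ht]
      rw [hstep]
      exact ih (i+1) h
    · rw [List.dropWhile_cons_of_neg ht] at h
      cases h

-- A's loop scanning the identifier tail: first offending char decides everything
theorem pvLoopA_scan_cons (u : List Char) (i ist : Nat) (b : Char) (v : List Char)
    (h : u.dropWhile pvTailOk = b :: v) :
    pvLoopA u i true false false false ist =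
      if b = '[' then pvLoopA v (i + (u.takeWhile pvTailOk).length + 1) true true false false ist
      else none := by
  induction u generalizing i with
  | nil => simp at h
  | cons c cs ih =>
    by_cases ht : pvTailOk c = true
    · rw [List.dropWhile_cons_of_pos ht] at h
      rw [List.takeWhile_cons_of_pos ht]
      have hstep : pvLoopA (c :: cs) i true false false false ist
          = pvLoopA cs (i+1) true false false false ist := by simp [pvLoopA, ht]
      rw [hstep, ih (i+1) h]
      by_cases hbq : b = '['
      · rw [if_pos hbq, if_pos hbq]
        have harith : i + 1 + (cs.takeWhile pvTailOk).length + 1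
            = i + (c :: cs.takeWhile pvTailOk).length + 1 := by
          simp only [List.length_cons]
          omega
        rw [harith]
      · rw [if_neg hbq, if_neg hbq]
    · rw [List.dropWhile_cons_of_neg ht] at h
      obtain ⟨hcb, hcv⟩ := List.cons_eq_cons.mp h
      rw [List.takeWhile_cons_of_neg ht, ← hcb, ← hcv]
      by_cases hbq : c = '['
      · subst hbq
        rw [if_pos rfl]
        have hstep : pvLoopA ('[' :: cs) i true false false false ist
            = pvLoopA cs (i+1) true true false false ist := by simp [pvLoopA, ht]
        rw [hstep]
        simp
      · rw [if_neg hbq]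
        simp [pvLoopA, ht, hbq]

-- a first char of a dropWhile result fails the predicate
theorem pvDropWhileHead {p : Char → Bool} {l r : List Char} {b : Char}
    (h : l.dropWhile p = b :: r) : p b = false := by
  induction l with
  | nil => simp at h
  | cons a l ih =>
    by_cases ha : p a = true
    · rw [List.dropWhile_cons_of_pos ha] at h; exact ih h
    · rw [List.dropWhile_cons_of_neg ha] at h
      obtain ⟨rfl, rfl⟩ := List.cons_eq_cons.mp h
      exact Bool.eq_false_iff.mpr ha


-- all chars of t satisfy p: takeWhile/dropWhile pass through t
theorem pvTakeWhileApp (p : Char → Bool) (t v : List Char) (h : ∀ x ∈ t, p x = true) :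
    (t ++ v).takeWhile p = t ++ v.takeWhile p := by
  induction t with
  | nil => simp
  | cons a t ih =>
    rw [List.cons_append, List.takeWhile_cons_of_pos (h a (by simp)), List.cons_append,
      ih (fun x hx => h x (by simp [hx]))]

theorem pvDropWhileApp (p : Char → Bool) (t v : List Char) (h : ∀ x ∈ t, p x = true) :
    (t ++ v).dropWhile p = v.dropWhile p := by
  induction t with
  | nil => simp
  | cons a t ih =>
    rw [List.cons_append, List.dropWhile_cons_of_pos (h a (by simp))]
    exact ih (fun x hx => h x (by simp [hx]))

-- outside D_, A and B agree
theorem pvMainAux (name : String) (hD : ¬ D_check_name_print name) :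
    check_name_print name = check_name_print_alt name := by
  simp only [check_name_print, check_name_print_alt]
  cases hcs : name.toList with
  | nil =>
    exact absurd (Or.inl (by cases name; simp_all)) hD
  | cons c u =>
    by_cases hc : pvHeadOk c = true
    · have hcbr : c ≠ '[' := pvHeadNeBr hc
      have hO : pvLoopA (c :: u) 0 false false false false 0
          = pvLoopA u 1 true false false false 0 := by simp [pvLoopA, hc]
      rw [hO]
      have htk0 : (c :: u).takeWhile (· ≠ '[') = c :: u.takeWhile (· ≠ '[') :=
        List.takeWhile_cons_of_pos (by simp [hcbr])
      have hdw0 : (c :: u).dropWhile (· ≠ '[') = u.dropWhile (· ≠ '[') :=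
        List.dropWhile_cons_of_pos (by simp [hcbr])
      rw [htk0, hdw0]
      cases hdw : u.dropWhile pvTailOk with
      | nil =>
        rw [pvLoopA_scan_nil u 1 0 hdw]
        have hall : ∀ x ∈ u, pvTailOk x = true := by
          intro x hx
          exact List.dropWhile_eq_nil_iff.mp hdw x hx
        have hne : ∀ x ∈ u, decide (x ≠ '[') = true := by
          intro x hx
          simp only [decide_eq_true_eq]
          exact pvTailNeBr (hall x hx)
        have htku : u.takeWhile (· ≠ '[') = u := by
          have := pvTakeWhileApp (fun x => decide (x ≠ '[')) u [] hne
          simpa using this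
        have hdwu : u.dropWhile (· ≠ '[') = [] := by
          have := pvDropWhileApp (fun x => decide (x ≠ '[')) u [] hne
          simpa using this
        rw [htku, hdwu]
        have hid : pvIsIdent (c :: u) = true := by
          simp only [pvIsIdent, hc, Bool.true_and, List.all_eq_true]
          exact hall
        simp [hid]
      | cons b v =>
        rw [pvLoopA_scan_cons u 1 0 b v hdw]
        have hbn : pvTailOk b = false := pvDropWhileHead hdw
        have htall : ∀ x ∈ u.takeWhile pvTailOk, pvTailOk x = true :=
          fun x hx => List.mem_takeWhile_imp hx
        have htne : ∀ x ∈ u.takeWhile pvTailOk, decide (x ≠ '[') = true := by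
          intro x hx
          simp only [decide_eq_true_eq]
          exact pvTailNeBr (htall x hx)
        have hu : u = u.takeWhile pvTailOk ++ b :: v := by
          conv_lhs => rw [← List.takeWhile_append_dropWhile (p := pvTailOk) (l := u)]
          rw [hdw]
        set t := u.takeWhile pvTailOk with htk
        by_cases hb : b = '['
        · subst hb
          rw [if_pos rfl]
          have htku : u.takeWhile (· ≠ '[') = t := by
            conv_lhs => rw [hu]
            rw [pvTakeWhileApp _ t _ htne, List.takeWhile_cons_of_neg (by simp), List.append_nil]
          have hdwu : u.dropWhile (· ≠ '[') = '[' :: v := by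
            conv_lhs => rw [hu]
            rw [pvDropWhileApp _ t _ htne, List.dropWhile_cons_of_neg (by simp)]
          rw [htku, hdwu]
          have hident : pvIsIdent (c :: t) = true := by
            simp only [pvIsIdent, hc, Bool.true_and, List.all_eq_true]
            exact htall
          rw [hident]
          cases v with
          | nil =>
            exfalso
            apply hD
            right
            refine ⟨by rw [hcs, hdw0, hdwu]; simp, ?_, by rw [hcs, hdw0, hdwu]; simp⟩
            rw [hcs, htk0, htku, pvDIdent_eq, hident]
          | cons d w =>
            by_cases hd : PySem.Chars.isdigit d = true
            · by_cases hwall : (w.all PySem.Chars.isdigit) = true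
              · exfalso
                apply hD
                right
                refine ⟨by rw [hcs, hdw0, hdwu]; simp, ?_, ?_⟩
                · rw [hcs, htk0, htku, pvDIdent_eq, hident]
                · rw [hcs, hdw0, hdwu]
                  simp [hd, hwall]
              · have hwall' : w.all PySem.Chars.isdigit = false := Bool.eq_false_iff.mpr hwall
                by_cases hrb : w.dropWhile PySem.Chars.isdigit = [']']
                · have hval : pvLoopA (d :: w) (1 + t.length + 1) true true false false 0
                      = some (true, 1 + t.length + 1) := by
                    rw [pvLoopA_lb, if_pos hd, if_neg (by simp [hwall']), if_pos hrb]
                  rw [hval]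
                  set e := w.takeWhile PySem.Chars.isdigit with he
                  have hw : w = e ++ [']'] := by
                    conv_lhs => rw [← List.takeWhile_append_dropWhile
                      (p := PySem.Chars.isdigit) (l := w)]
                    rw [hrb]
                  have heall : ∀ x ∈ e, PySem.Chars.isdigit x = true :=
                    fun x hx => List.mem_takeWhile_imp hx
                  have hend : PySem.Chars.endswith (d :: w) [']'] = true := by
                    rw [PySem.Chars.endswith_iff]
                    exact ⟨d :: e, by rw [hw, List.cons_append]⟩
                  have hdl : (d :: w).dropLast = d :: e := by
                    rw [hw, ← List.cons_append, List.dropLast_concat]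
                  have hdig : PySem.Chars.strIsdigit (d :: w).dropLast = true := by
                    rw [hdl]
                    simp only [PySem.Chars.strIsdigit, List.isEmpty_cons, Bool.not_false,
                      Bool.true_and, List.all_cons, hd, List.all_eq_true]
                    exact heall
                  have hsym : PySem.List.slice (c :: u) (some 0)
                      (some (((1 + t.length + 1 : Nat) : Int) - 1)) = c :: t := by
                    have h1 : (((1 + t.length + 1 : Nat) : Int) - 1)
                        = ((t.length + 1 : Nat) : Int) := by push_cast; ring
                    have h2 : (c :: u) = (c :: t) ++ '[' :: d :: w := by
                      conv_lhs => rw [hu]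
                      rfl
                    have h3 : t.length + 1 = (c :: t).length := by
                      simp only [List.length_cons]
                    rw [h1, h2, PySem.List.slice_zero_start, PySem.List.slice_to_natCast,
                      h3, List.take_left]
                  have hdig2 : PySem.List.slice (c :: u)
                      (some ((1 + t.length + 1 : Nat) : Int)) (some (-1))
                      = (d :: w).dropLast := by
                    rw [pvSliceNegOne]
                    have h2 : (c :: u) = ((c :: t) ++ ['[']) ++ d :: w := by
                      conv_lhs => rw [hu]
                      simp
                    have h3 : 1 + t.length + 1 = ((c :: t) ++ ['[']).length := by
                      simp only [List.length_append, List.length_cons, List.length_nil]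
                      omega
                    rw [h2, h3, List.drop_left]
                  show (true, some (String.mk (PySem.List.slice (c :: u) (some 0)
                      (some (((1 + t.length + 1 : Nat) : Int) - 1)))),
                    some ((PySem.Int.ofChars? (PySem.List.slice (c :: u)
                      (some ((1 + t.length + 1 : Nat) : Int)) (some (-1)))).getD 0)) = _
                  rw [hsym, hdig2]
                  simp [hend, hdig]
                · have hval : pvLoopA (d :: w) (1 + t.length + 1) true true false false 0
                      = none := by
                    rw [pvLoopA_lb, if_pos hd, if_neg (by simp [hwall']), if_neg hrb]
                  rw [hval]
                  show (false, none, none) = _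
                  by_cases hend : PySem.Chars.endswith (d :: w) [']'] = true
                  · obtain ⟨uu, huu⟩ := (PySem.Chars.endswith_iff _ _).mp hend
                    have hdl : (d :: w).dropLast = uu := by rw [← huu, List.dropLast_concat]
                    have hguard : PySem.Chars.strIsdigit (d :: w).dropLast = false := by
                      rw [hdl]
                      cases uu with
                      | nil => rfl
                      | cons q uu' =>
                        have hq : q = d := by
                          have h5 := huu
                          simp only [List.cons_append] at h5
                          exact (List.cons_eq_cons.mp h5).1
                        subst hq
                        simp only [PySem.Chars.strIsdigit, List.isEmpty_cons, Bool.not_false,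
                          Bool.true_and]
                        rw [Bool.eq_false_iff]
                        intro hcon
                        have hall' := List.all_eq_true.mp hcon
                        have hwuu : w = uu' ++ [']'] := by
                          have h5 := huu
                          simp only [List.cons_append] at h5
                          exact ((List.cons_eq_cons.mp h5).2).symm
                        have hdd : w.dropWhile PySem.Chars.isdigit = [']'] := by
                          rw [hwuu, List.dropWhile_append]
                          have h6 : uu'.dropWhile PySem.Chars.isdigit = [] := by
                            rw [List.dropWhile_eq_nil_iff]
                            exact fun x hx => hall' x (List.mem_cons_of_mem _ hx)
                          have h7 : PySem.Chars.isdigit ']' = false := by decide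
                          simp [h6, h7]
                        exact hrb hdd
                    simp [hend, hguard]
                  · have hend' : PySem.Chars.endswith (d :: w) [']'] = false :=
                      Bool.eq_false_iff.mpr hend
                    simp [hend']
            · have hd' : PySem.Chars.isdigit d = false := Bool.eq_false_iff.mpr hd
              have hval : pvLoopA (d :: w) (1 + t.length + 1) true true false false 0
                  = none := by
                rw [pvLoopA_lb, if_neg (by simp [hd'])]
              rw [hval]
              show (false, none, none) = _
              by_cases hend : PySem.Chars.endswith (d :: w) [']'] = true
              · obtain ⟨uu, huu⟩ := (PySem.Chars.endswith_iff _ _).mp hend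
                have hdl : (d :: w).dropLast = uu := by rw [← huu, List.dropLast_concat]
                have hguard : PySem.Chars.strIsdigit (d :: w).dropLast = false := by
                  rw [hdl]
                  cases uu with
                  | nil => rfl
                  | cons q uu' =>
                    have hq : q = d := by
                      have h5 := huu
                      simp only [List.cons_append] at h5
                      exact (List.cons_eq_cons.mp h5).1
                    subst hq
                    simp [PySem.Chars.strIsdigit, hd']
                simp [hend, hguard]
              · have hend' : PySem.Chars.endswith (d :: w) [']'] = false :=
                  Bool.eq_false_iff.mpr hend
                simp [hend']
        · rw [if_neg hb]
          have htku : u.takeWhile (· ≠ '[') = t ++ b :: v.takeWhile (· ≠ '[') := by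
            conv_lhs => rw [hu]
            rw [pvTakeWhileApp _ t _ htne, List.takeWhile_cons_of_pos (by simp [hb])]
          rw [htku]
          have hident : pvIsIdent (c :: (t ++ b :: v.takeWhile (· ≠ '['))) = false := by
            simp only [pvIsIdent, Bool.and_eq_false_iff]
            right
            rw [List.all_eq_false]
            exact ⟨b, by simp, by simp [hbn]⟩
          simp only [ne_eq, decide_not] at hident
          simp [hident]
    · have hc' : pvHeadOk c = false := Bool.eq_false_iff.mpr hc
      have hO : pvLoopA (c :: u) 0 false false false false 0 = none := by
        simp [pvLoopA, hc']
      rw [hO]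
      by_cases hbr : c = '['
      · subst hbr
        have htk0 : ('[' :: u).takeWhile (· ≠ '[') = [] :=
          List.takeWhile_cons_of_neg (by simp)
        rw [htk0]
        simp [pvIsIdent]
      · have htk0 : (c :: u).takeWhile (· ≠ '[') = c :: u.takeWhile (· ≠ '[') :=
          List.takeWhile_cons_of_pos (by simp [hbr])
        rw [htk0]
        have hident : pvIsIdent (c :: u.takeWhile (· ≠ '[')) = false := by
          simp [pvIsIdent, hc']
        simp only [ne_eq, decide_not] at hident
        simp [hident]

-- inside D_, A accepts with the whole name and B rejects
theorem pvTightAux (name : String) (hD : D_check_name_print name) :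
    check_name_print name = (true, some name, none) ∧
      check_name_print_alt name = (false, none, none) := by
  rcases hD with h0 | ⟨hne, hid, hdig⟩
  · subst h0
    exact ⟨by decide, by decide⟩
  · rw [pvDIdent_eq] at hid
    cases hb : name.toList.dropWhile (· ≠ '[') with
    | nil => exact absurd hb hne
    | cons bh rest =>
      have hbh : bh = '[' := by
        have h1 := pvDropWhileHead hb
        simpa using h1
      subst hbh
      rw [hb] at hdig
      simp only [List.tail_cons] at hdig
      cases hbc : name.toList.takeWhile (· ≠ '[') with
      | nil =>
        rw [hbc] at hid
        simp [pvIsIdent] at hid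
      | cons c t =>
        rw [hbc] at hid
        have hcu : pvHeadOk c = true ∧ t.all pvTailOk = true := by
          simpa [pvIsIdent] using hid
        have htall : ∀ x ∈ t, pvTailOk x = true := List.all_eq_true.mp hcu.2
        have hsplit : name.toList = c :: (t ++ '[' :: rest) := by
          conv_lhs => rw [← List.takeWhile_append_dropWhile
            (p := fun x => decide (x ≠ '[')) (l := name.toList)]
          rw [hbc, hb, List.cons_append]
        have hdwT : (t ++ '[' :: rest).dropWhile pvTailOk = '[' :: rest := by
          rw [pvDropWhileApp pvTailOk t _ htall, List.dropWhile_cons_of_neg (by decide)]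
        have hrest : ∃ ist, pvLoopA rest
            (1 + ((t ++ '[' :: rest).takeWhile pvTailOk).length + 1) true true false false 0
            = some (false, ist) := by
          cases rest with
          | nil => exact ⟨0, rfl⟩
          | cons d w =>
            have hdw2 : PySem.Chars.isdigit d = true ∧ w.all PySem.Chars.isdigit = true := by
              simpa using hdig
            exact ⟨_, by rw [pvLoopA_lb, if_pos hdw2.1, if_pos hdw2.2]⟩
        obtain ⟨ist, h3⟩ := hrest
        constructor
        · simp only [check_name_print]
          rw [hsplit]
          have hstep1 : pvLoopA (c :: (t ++ '[' :: rest)) 0 false false false false 0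
              = pvLoopA (t ++ '[' :: rest) 1 true false false false 0 := by
            simp [pvLoopA, hcu.1]
          rw [hstep1, pvLoopA_scan_cons _ _ _ '[' rest hdwT, if_pos rfl, h3]
          simp
        · simp only [check_name_print_alt]
          rw [hb, hbc, hid]
          have hend : PySem.Chars.endswith rest [']'] = false := by
            rw [Bool.eq_false_iff]
            intro hcon
            have hmem : ']' ∈ rest :=
              List.singleton_sublist.mp ((PySem.Chars.endswith_iff _ _).mp hcon).sublist
            have := List.all_eq_true.mp hdig _ hmem
            exact absurd this (by decide)
          simp [hend]

-- ===== VERDICT (by name: the statements are the Claim_ definitions above) =====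
theorem check_name_print_spec : Claim_unchanged_check_name_print := by
  intro name _ hD
  exact pvMainAux name hD

theorem check_name_print_changed : Claim_changed_check_name_print := by
  unfold Claim_changed_check_name_print; decide

theorem check_name_print_tight : Claim_exact_check_name_print := by
  intro name _ hD
  obtain ⟨hA, hB⟩ := pvTightAux name hD
  rw [hA, hB]
  simp
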